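-- pv_equiv track=rewrite | github.com/icysaintdx/InvestMind-Pro | backend/dataflows/enhanced_data_service.py | _calculate_urgency
-- ===== SOURCE A (Python) =====
-- from typing import Dict, List, Optional, Tuple
--
-- class UrgencyLevel:
--     """紧急程度"""
--     IMMEDIATE = "immediate"  # 立即处理
--     HIGH = "high"            # 高优先级
--     MEDIUM = "medium"        # 中等优先级
--     LOW = "low"              # 低优先级
--     INFO = "info"            # 仅供参考
--
-- def _calculate_urgency(risk_items: List[Dict]) -> str:
--     """计算紧急程度"""
--     if not risk_items:
--         return UrgencyLevel.INFO
--
--     for r in risk_items: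
--         if r.get('urgency') == UrgencyLevel.IMMEDIATE:
--             return UrgencyLevel.IMMEDIATE
--
--     high_count = sum(1 for r in risk_items if r.get('urgency') == UrgencyLevel.HIGH)
--     if high_count > 0:
--         return UrgencyLevel.HIGH
--
--     medium_count = sum(1 for r in risk_items if r.get('urgency') == UrgencyLevel.MEDIUM)
--     if medium_count > 0:
--         return UrgencyLevel.MEDIUM
--
--     return UrgencyLevel.LOW
-- ===== SOURCE B (Python) =====
-- def _calculate_urgency(risk_items):
--     """Single-pass max over a priority table instead of three cascading scans."""
--     if not risk_items:
--         return "info"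
--     rank = {"immediate": 4, "high": 3, "medium": 2}
--     best = 1
--     for r in risk_items:
--         best = max(best, rank.get(r.get('urgency'), 1))
--     return {4: "immediate", 3: "high", 2: "medium"}.get(best, "low")
-- ===== Notes on version B (the rewrite author's own statement) =====
-- stated objective: simpler
-- what changed: Replaces A's three cascading scans (find-immediate loop, high count, medium count) by one pass computing the maximum numeric rank from a priority table and translating it back to a level name.
import Mathlib
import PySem

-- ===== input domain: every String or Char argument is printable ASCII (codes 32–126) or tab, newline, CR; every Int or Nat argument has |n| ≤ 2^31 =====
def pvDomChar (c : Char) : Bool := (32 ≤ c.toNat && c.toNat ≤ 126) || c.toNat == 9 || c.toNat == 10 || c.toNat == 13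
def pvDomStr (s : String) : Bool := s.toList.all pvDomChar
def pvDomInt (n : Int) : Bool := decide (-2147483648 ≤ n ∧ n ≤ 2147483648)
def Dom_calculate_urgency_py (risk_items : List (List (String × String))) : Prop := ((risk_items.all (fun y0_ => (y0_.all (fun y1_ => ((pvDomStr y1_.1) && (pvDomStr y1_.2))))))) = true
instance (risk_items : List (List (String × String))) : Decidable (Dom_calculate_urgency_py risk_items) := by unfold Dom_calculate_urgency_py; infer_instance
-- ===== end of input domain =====

-- B replaces A's three cascading scans by one max-reduction over a priority table (objective: simpler).

-- ===== PORT A =====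
-- r.get('urgency') : first-match lookup in the dict r
def pvGetUrg (r : List (String × String)) : Option String := (PySem.Dict.mk r).get? "urgency"

-- the first for-loop: return "immediate" on the first match
def pvFindImm : List (List (String × String)) → Bool
  | [] => false
  | r :: rest => if pvGetUrg r = some "immediate" then true else pvFindImm rest

-- sum(1 for r in risk_items if r.get('urgency') == lvl)
def pvCountLvl (lvl : String) (risk_items : List (List (String × String))) : Int :=
  risk_items.foldl (fun acc r => if pvGetUrg r = some lvl then acc + 1 else acc) 0

def calculate_urgency_py (risk_items : List (List (String × String))) : String :=
  if risk_items.isEmpty then "info"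
  else if pvFindImm risk_items then "immediate"
  else if pvCountLvl "high" risk_items > 0 then "high"
  else if pvCountLvl "medium" risk_items > 0 then "medium"
  else "low"

-- ===== PORT B =====
-- rank.get(r.get('urgency'), 1)
def pvRankOf (r : List (String × String)) : Int :=
  match (PySem.Dict.mk r).get? "urgency" with
  | some u => PySem.Dict.getD (PySem.Dict.ofList [("immediate", (4:Int)), ("high", 3), ("medium", 2)]) u 1
  | none => 1

def calculate_urgency_py_alt (risk_items : List (List (String × String))) : String :=
  if risk_items.isEmpty then "info"
  else
    let best := risk_items.foldl (fun b r => max b (pvRankOf r)) 1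
    PySem.Dict.getD (PySem.Dict.ofList [((4:Int), "immediate"), (3, "high"), (2, "medium")]) best "low"

-- ===== PRECONDITION & SPEC =====
def Spec_calculate_urgency_py (risk_items : List (List (String × String))) (out : String) : Prop := out = calculate_urgency_py_alt risk_items
instance (risk_items : List (List (String × String))) (out : String) : Decidable (Spec_calculate_urgency_py risk_items out) := by unfold Spec_calculate_urgency_py; infer_instance

-- ===== CLAIM (what is proved, stated in full; the proofs are below) =====
def Claim_equal_calculate_urgency_py : Prop := ∀ (risk_items : List (List (String × String))), Dom_calculate_urgency_py risk_items → Spec_calculate_urgency_py risk_items (calculate_urgency_py risk_items)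

-- ===== LEMMAS AND PROOFS =====

-- the two literal dicts, as plain association lists
lemma pvRankTable_eq :
    PySem.Dict.ofList [("immediate", (4:Int)), ("high", 3), ("medium", 2)]
      = PySem.Dict.mk [("immediate", 4), ("high", 3), ("medium", 2)] := by decide

-- rank of an item, written by cases on the urgency value
lemma pvRankOf_cases (r : List (String × String)) :
    pvRankOf r = if pvGetUrg r = some "immediate" then 4
      else if pvGetUrg r = some "high" then 3
      else if pvGetUrg r = some "medium" then 2 else 1 := by
  unfold pvRankOf pvGetUrg
  cases h : (PySem.Dict.mk r).get? "urgency" with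
  | none => simp
  | some u =>
    by_cases h1 : u = "immediate"
    · subst h1; decide
    · by_cases h2 : u = "high"
      · subst h2; decide
      · by_cases h3 : u = "medium"
        · subst h3; decide
        · simp [pvRankTable_eq, PySem.Dict.getD_eq_get?_getD, PySem.Dict.get?,
            List.find?_cons, beq_iff_eq, Ne.symm h1, Ne.symm h2, Ne.symm h3, h1, h2, h3]

lemma pvRankOf_bounds (r : List (String × String)) : 1 ≤ pvRankOf r ∧ pvRankOf r ≤ 4 := by
  rw [pvRankOf_cases]; split_ifs <;> omega

-- the single-pass max, characterised as A's cascade value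
def pvBest (xs : List (List (String × String))) : Int :=
  xs.foldl (fun b r => max b (pvRankOf r)) 1

lemma pvBest_acc (xs : List (List (String × String))) (b : Int) (hb : 1 ≤ b) :
    xs.foldl (fun b r => max b (pvRankOf r)) b
      = max b (xs.foldl (fun b r => max b (pvRankOf r)) 1) := by
  induction xs generalizing b with
  | nil => simp; omega
  | cons r xs ih =>
    have h1 := pvRankOf_bounds r
    simp only [List.foldl_cons]
    rw [ih (max b (pvRankOf r)) (by omega), ih (max 1 (pvRankOf r)) (by omega)]
    omega

lemma pvBest_cons (r : List (String × String)) (xs : List (List (String × String))) :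
    pvBest (r :: xs) = max (pvRankOf r) (pvBest xs) := by
  have h1 := pvRankOf_bounds r
  simp only [pvBest, List.foldl_cons]
  rw [pvBest_acc xs (max 1 (pvRankOf r)) (by omega)]
  omega

lemma pvBest_bounds (xs : List (List (String × String))) : 1 ≤ pvBest xs ∧ pvBest xs ≤ 4 := by
  induction xs with
  | nil => simp [pvBest]
  | cons r xs ih =>
    have := pvRankOf_bounds r
    rw [pvBest_cons]; omega

lemma pvCountLvl_acc (lvl : String) (xs : List (List (String × String))) (c : Int) :
    xs.foldl (fun acc r => if pvGetUrg r = some lvl then acc + 1 else acc) c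
      = c + pvCountLvl lvl xs := by
  induction xs generalizing c with
  | nil => simp [pvCountLvl]
  | cons r xs ih =>
    simp only [pvCountLvl, List.foldl_cons]
    split_ifs
    · rw [ih, ih ((0:Int) + 1)]; omega
    · rw [ih, ih (0:Int)]; omega

lemma pvCountLvl_cons (lvl : String) (r : List (String × String))
    (xs : List (List (String × String))) :
    pvCountLvl lvl (r :: xs)
      = (if pvGetUrg r = some lvl then 1 else 0) + pvCountLvl lvl xs := by
  simp only [pvCountLvl, List.foldl_cons]
  rw [pvCountLvl_acc]
  simp only [pvCountLvl]
  split_ifs <;> omega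

lemma pvCountLvl_nonneg (lvl : String) (xs : List (List (String × String))) :
    0 ≤ pvCountLvl lvl xs := by
  induction xs with
  | nil => simp [pvCountLvl]
  | cons r xs ih => rw [pvCountLvl_cons]; split_ifs <;> omega

lemma pvCountLvl_pos_iff (lvl : String) (xs : List (List (String × String))) :
    pvCountLvl lvl xs > 0 ↔ ∃ r ∈ xs, pvGetUrg r = some lvl := by
  induction xs with
  | nil => simp [pvCountLvl]
  | cons r xs ih =>
    have hnn := pvCountLvl_nonneg lvl xs
    rw [pvCountLvl_cons]
    simp only [List.mem_cons]
    constructor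
    · intro h
      split_ifs at h with hr
      · exact ⟨r, Or.inl rfl, hr⟩
      · obtain ⟨s, hs, hs'⟩ := ih.mp (by omega); exact ⟨s, Or.inr hs, hs'⟩
    · rintro ⟨s, hs | hs, hs'⟩
      · subst hs; simp [hs']; omega
      · have := ih.mpr ⟨s, hs, hs'⟩
        split_ifs <;> omega

lemma pvFindImm_iff (xs : List (List (String × String))) :
    pvFindImm xs = true ↔ ∃ r ∈ xs, pvGetUrg r = some "immediate" := by
  induction xs with
  | nil => simp [pvFindImm]
  | cons r xs ih =>
    simp only [pvFindImm]
    split_ifs with hr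
    · constructor
      · intro _; exact ⟨r, List.mem_cons_self, hr⟩
      · intro _; rfl
    · rw [ih]
      constructor
      · rintro ⟨s, hs, hs'⟩; exact ⟨s, List.mem_cons_of_mem r hs, hs'⟩
      · rintro ⟨s, hs, hs'⟩
        rcases List.mem_cons.mp hs with h | h
        · subst h; exact absurd hs' hr
        · exact ⟨s, h, hs'⟩

-- the max rank equals the cascade's level, case by case
lemma pvBest_eq_four (xs : List (List (String × String))) :
    pvBest xs = 4 ↔ ∃ r ∈ xs, pvRankOf r = 4 := by
  induction xs with
  | nil => simp [pvBest]
  | cons r xs ih =>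
    have h1 := pvRankOf_bounds r
    have h2 := pvBest_bounds xs
    rw [pvBest_cons]
    simp only [List.mem_cons]
    constructor
    · intro h
      by_cases hr : pvRankOf r = 4
      · exact ⟨r, Or.inl rfl, hr⟩
      · obtain ⟨s, hs, hs'⟩ := ih.mp (by omega); exact ⟨s, Or.inr hs, hs'⟩
    · rintro ⟨s, hs | hs, hs'⟩
      · subst hs; omega
      · have := ih.mpr ⟨s, hs, hs'⟩; omega

lemma pvBest_ge_iff (k : Int) (hk : 2 ≤ k) (xs : List (List (String × String))) :
    k ≤ pvBest xs ↔ ∃ r ∈ xs, k ≤ pvRankOf r := by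
  induction xs with
  | nil =>
    simp only [pvBest, List.foldl_nil, List.not_mem_nil, false_and, exists_false, iff_false, not_le]
    omega
  | cons r xs ih =>
    have h1 := pvRankOf_bounds r
    have h2 := pvBest_bounds xs
    rw [pvBest_cons]
    simp only [List.mem_cons]
    constructor
    · intro h
      by_cases hr : k ≤ pvRankOf r
      · exact ⟨r, Or.inl rfl, hr⟩
      · obtain ⟨s, hs, hs'⟩ := ih.mp (by omega); exact ⟨s, Or.inr hs, hs'⟩
    · rintro ⟨s, hs | hs, hs'⟩
      · subst hs; omega
      · have := ih.mpr ⟨s, hs, hs'⟩; omega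

lemma pvRank_four_iff (r : List (String × String)) :
    pvRankOf r = 4 ↔ pvGetUrg r = some "immediate" := by
  rw [pvRankOf_cases]; split_ifs <;> simp_all

lemma pvRank_ge_three_iff (r : List (String × String)) :
    3 ≤ pvRankOf r ↔ (pvGetUrg r = some "immediate" ∨ pvGetUrg r = some "high") := by
  rw [pvRankOf_cases]; split_ifs <;> simp_all

lemma pvRank_ge_two_iff (r : List (String × String)) :
    2 ≤ pvRankOf r ↔ (pvGetUrg r = some "immediate" ∨ pvGetUrg r = some "high" ∨ pvGetUrg r = some "medium") := by
  rw [pvRankOf_cases]; split_ifs <;> simp_all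

lemma pvNameTable_eval (k : Int) :
    PySem.Dict.getD (PySem.Dict.ofList [((4:Int), "immediate"), (3, "high"), (2, "medium")]) k "low"
      = if k = 4 then "immediate" else if k = 3 then "high" else if k = 2 then "medium" else "low" := by
  have hd : PySem.Dict.ofList [((4:Int), "immediate"), (3, "high"), (2, "medium")]
      = PySem.Dict.mk [((4:Int), "immediate"), (3, "high"), (2, "medium")] := by decide
  rw [hd, PySem.Dict.getD_eq_get?_getD]
  simp only [PySem.Dict.get?_mk_cons]
  split_ifs <;> simp_all [PySem.Dict.get?]

-- ===== VERDICT (by name: the statement is the Claim_ definition above) =====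
theorem calculate_urgency_py_spec : Claim_equal_calculate_urgency_py := by
  intro xs _
  unfold Spec_calculate_urgency_py calculate_urgency_py calculate_urgency_py_alt
  by_cases hemp : xs.isEmpty
  · simp [hemp]
  · simp only [hemp, if_false, Bool.false_eq_true]
    have hb := pvBest_bounds xs
    show _ = PySem.Dict.getD _ (pvBest xs) "low"
    rw [pvNameTable_eval]
    by_cases h4 : pvBest xs = 4
    · have : pvFindImm xs = true := by
        rw [pvFindImm_iff]
        obtain ⟨r, hr, hr'⟩ := (pvBest_eq_four xs).mp h4
        exact ⟨r, hr, (pvRank_four_iff r).mp hr'⟩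
      simp [this, h4]
    · have himm : pvFindImm xs = false := by
        rw [Bool.eq_false_iff, Ne, pvFindImm_iff]
        rintro ⟨r, hr, hr'⟩
        exact h4 ((pvBest_eq_four xs).mpr ⟨r, hr, (pvRank_four_iff r).mpr hr'⟩)
      simp only [himm, if_false, Bool.false_eq_true]
      by_cases h3 : pvBest xs = 3
      · have : pvCountLvl "high" xs > 0 := by
          rw [pvCountLvl_pos_iff]
          obtain ⟨r, hr, hr'⟩ := (pvBest_ge_iff 3 (by omega) xs).mp (by omega)
          rcases (pvRank_ge_three_iff r).mp hr' with h | h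
          · exact absurd ((pvBest_eq_four xs).mpr ⟨r, hr, (pvRank_four_iff r).mpr h⟩) h4
          · exact ⟨r, hr, h⟩
        simp [this, h3]
      · have hhigh : ¬ pvCountLvl "high" xs > 0 := by
          rw [pvCountLvl_pos_iff]
          rintro ⟨r, hr, hr'⟩
          have : 3 ≤ pvBest xs := (pvBest_ge_iff 3 (by omega) xs).mpr
            ⟨r, hr, (pvRank_ge_three_iff r).mpr (Or.inr hr')⟩
          omega
        simp only [hhigh, if_false]
        by_cases h2 : pvBest xs = 2
        · have : pvCountLvl "medium" xs > 0 := by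
            rw [pvCountLvl_pos_iff]
            obtain ⟨r, hr, hr'⟩ := (pvBest_ge_iff 2 (by omega) xs).mp (by omega)
            rcases (pvRank_ge_two_iff r).mp hr' with h | h | h
            · exact absurd ((pvBest_eq_four xs).mpr ⟨r, hr, (pvRank_four_iff r).mpr h⟩) h4
            · exact absurd ((pvCountLvl_pos_iff "high" xs).mpr ⟨r, hr, h⟩) hhigh
            · exact ⟨r, hr, h⟩
          simp [this, h2]
        · have hmed : ¬ pvCountLvl "medium" xs > 0 := by
            rw [pvCountLvl_pos_iff]
            rintro ⟨r, hr, hr'⟩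
            have : 2 ≤ pvBest xs := (pvBest_ge_iff 2 (by omega) xs).mpr
              ⟨r, hr, (pvRank_ge_two_iff r).mpr (Or.inr (Or.inr hr'))⟩
            omega
          have h1 : pvBest xs = 1 := by omega
          simp [hmed, h1]
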